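-- pv_equiv track=rewrite | github.com/j19sch/advent-of-code | 2020/day06-puzzle1.py | parse_answers_file
-- ===== SOURCE A (Python) =====
-- def parse_answers_file(the_file):
-- 	answers = []
-- 	index = 0
--
-- 	for answer in the_file:
-- 		try:
-- 			answers[index]
-- 		except IndexError:
-- 			answers.append([])
--
-- 		if answer != "":
-- 			answers[index].extend([_ for _ in answer])
-- 		else:
-- 			index += 1
--
-- 	return answers
-- ===== SOURCE B (Python) =====
-- def parse_answers_file(the_file):
--     # Recursive decomposition: peel off the leading group (lines up to the
--     # first blank line), flatten it to characters, and recurse past the blank.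
--     if not the_file:
--         return []
--     try:
--         cut = the_file.index("")
--     except ValueError:
--         return [[c for line in the_file for c in line]]
--     group = [c for line in the_file[:cut] for c in line]
--     return [group] + parse_answers_file(the_file[cut + 1:])
-- ===== Notes on version B (the rewrite author's own statement) =====
-- stated objective: alternative
-- what changed: Replaces A's iterative single pass with lazy index+IndexError group creation by a recursive divide-and-conquer: find the first blank line with list.index (a C-level scan), emit that prefix flattened to characters, and recurse on the suffix past the blank.
import Mathlib
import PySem

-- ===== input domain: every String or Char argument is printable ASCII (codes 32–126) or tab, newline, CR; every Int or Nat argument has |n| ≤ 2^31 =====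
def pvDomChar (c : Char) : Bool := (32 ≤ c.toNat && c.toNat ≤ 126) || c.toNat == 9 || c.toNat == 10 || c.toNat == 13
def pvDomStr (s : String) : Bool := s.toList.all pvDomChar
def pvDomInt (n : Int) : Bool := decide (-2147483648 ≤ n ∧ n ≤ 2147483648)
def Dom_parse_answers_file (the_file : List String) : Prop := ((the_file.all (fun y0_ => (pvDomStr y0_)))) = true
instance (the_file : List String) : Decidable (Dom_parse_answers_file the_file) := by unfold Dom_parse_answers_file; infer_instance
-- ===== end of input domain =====

-- B replaces A's iterative lazy-index single pass by a recursive split-at-first-blank decomposition (same asymptotics; a timing run measured a constant-factor speedup).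

-- ===== PORT A =====
-- state: (answers, index).  Python's `index` starts at 0 and is only ever
-- incremented, so it is a Nat here; `answers[index]` raising IndexError is
-- `answers[index]? = none`, and the in-place extend is a `List.set`.
def parse_answers_file (the_file : List String) : List (List String) :=
  (the_file.foldl (fun (st : List (List String) × Nat) answer =>
      let answers := if st.1[st.2]? = none then st.1 ++ [[]] else st.1
      if answer ≠ "" then
        (answers.set st.2 ((answers[st.2]?.getD []) ++ answer.toList.map (fun c => String.ofList [c])), st.2)
      else
        (answers, st.2 + 1))
    ([], 0)).1

-- ===== PORT B =====
-- the_file.index("") raising ValueError is PySem.List.index? = none; the two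
-- slices the_file[:cut] / the_file[cut+1:] are PySem.List.slice; the nested
-- comprehension [c for line in … for c in line] is flatMap over the lines.
def parse_answers_file_alt (the_file : List String) : List (List String) :=
  if h : the_file = [] then []
  else
    match PySem.List.index? the_file "" with
    | none => [the_file.flatMap (fun line => line.toList.map (fun c => String.ofList [c]))]
    | some cut =>
        ((PySem.List.slice the_file none (some (cut : Int))).flatMap
            (fun line => line.toList.map (fun c => String.ofList [c])))
        :: parse_answers_file_alt (PySem.List.slice the_file (some ((cut : Int) + 1)) none)
termination_by the_file.length
decreasing_by
  have hc : ((cut : Int) + 1) = ((cut + 1 : Nat) : Int) := by push_cast; ring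
  rw [hc, PySem.List.slice_from_natCast]
  have hpos : 0 < the_file.length := List.length_pos_iff.mpr h
  simp only [List.length_drop]
  omega

-- ===== PRECONDITION & SPEC =====
def Spec_parse_answers_file (the_file : List String) (out : List (List String)) : Prop := out = parse_answers_file_alt the_file
instance (the_file : List String) (out : List (List String)) : Decidable (Spec_parse_answers_file the_file out) := by unfold Spec_parse_answers_file; infer_instance

-- ===== CLAIM (what is proved, stated in full; the proofs are below) =====
def Claim_equal_parse_answers_file : Prop := ∀ (the_file : List String), Dom_parse_answers_file the_file → Spec_parse_answers_file the_file (parse_answers_file the_file)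

-- ===== LEMMAS AND PROOFS =====

-- proof-side reference implementation (the segments fold), used only to bridge
-- A's fold to B's recursion
def pvStep (segs : List (List String)) (line : String) : List (List String) :=
  if line = "" then segs ++ [([] : List String)]
  else segs.dropLast ++ [segs.getLastD [] ++ [line]]

def pvFlat (seg : List String) : List String :=
  (PySem.Str.join "" seg).toList.map (fun c => String.ofList [c])

def pvClean (segs : List (List String)) : List (List String) :=
  if segs.getLastD [] = [] then segs.dropLast else segs

def pvOld (file : List String) : List (List String) :=
  (pvClean (file.foldl pvStep [[]])).map pvFlat

theorem pvClean_cons (p : List String) (r : List (List String)) (hr : r ≠ []) :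
    pvClean (p :: r) = p :: pvClean r := by
  cases r with
  | nil => exact absurd rfl hr
  | cons a t =>
    unfold pvClean
    rw [List.getLastD_eq_getLast?, List.getLastD_eq_getLast?, List.getLast?_cons_cons,
      List.dropLast_cons₂]
    by_cases hc : ((a :: t).getLast?.getD []) = [] <;> simp [hc]

theorem pvJoinNil_concat (p : List (List Char)) (q : List Char) :
    PySem.Chars.join [] (p ++ [q]) = PySem.Chars.join [] p ++ q := by
  induction p with
  | nil => simp [PySem.Chars.join_singleton, PySem.Chars.join_nil]
  | cons a p ih =>
    cases p with
    | nil => simp [PySem.Chars.join_cons_cons, PySem.Chars.join_singleton]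
    | cons b r =>
      simp only [List.cons_append] at ih ⊢
      simp only [PySem.Chars.join_cons_cons, ih]
      simp

theorem pvFlat_concat (t : List String) (x : String) :
    pvFlat (t ++ [x]) = pvFlat t ++ x.toList.map (fun c => String.ofList [c]) := by
  simp [pvFlat, pvJoinNil_concat]

theorem pvFlat_nil : pvFlat [] = [] := by decide

theorem pvFlat_eq_flatMap (seg : List String) :
    pvFlat seg = seg.flatMap (fun line => line.toList.map (fun c => String.ofList [c])) := by
  induction seg using List.reverseRecOn with
  | nil => simp [pvFlat_nil]
  | append_singleton t x ih => simp [pvFlat_concat, ih]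

-- core invariant: running A's fold from the state corresponding to segments
-- l ++ [t] (l = finished segments, t = current segment) agrees with
-- cleaning-and-flattening the pvStep fold result.
theorem pv_inv (file : List String) :
    ∀ (l : List (List String)) (t : List String),
      (file.foldl (fun (st : List (List String) × Nat) answer =>
          let answers := if st.1[st.2]? = none then st.1 ++ [[]] else st.1
          if answer ≠ "" then
            (answers.set st.2 ((answers[st.2]?.getD []) ++ answer.toList.map (fun c => String.ofList [c])), st.2)
          else
            (answers, st.2 + 1))
        ((if t = [] then l else l ++ [t]).map pvFlat, l.length)).1
      =
      (let segs := file.foldl pvStep (l ++ [t]);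
       if segs.getLastD [] = [] then segs.dropLast else segs).map pvFlat := by
  induction file with
  | nil =>
    intro l t
    by_cases ht : t = [] <;> simp [ht]
  | cons line file ih =>
    intro l t
    simp only [List.foldl_cons]
    by_cases hline : line = ""
    · subst hline
      by_cases ht : t = []
      · subst ht
        have h2 := ih (l ++ [([] : List String)]) []
        simp only [pvStep,
          List.length_append, List.length_cons, List.length_nil, List.append_assoc,
          List.cons_append, List.nil_append] at h2 ⊢
        simp at h2 ⊢
        exact h2
      · have h2 := ih (l ++ [t]) []
        have hget : ((l ++ [t]).map pvFlat)[l.length]? = some (pvFlat t) := by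
          simp
        simp only [pvStep,
          List.length_append, List.length_cons, List.length_nil, List.append_assoc,
          List.cons_append, List.nil_append] at h2 ⊢
        simp [ht] at h2 ⊢
        exact h2
    · by_cases ht : t = []
      · subst ht
        have h2 := ih l [line]
        have h1 : pvFlat [line] = line.toList.map (fun c => String.ofList [c]) := by
          simpa [pvFlat_nil] using pvFlat_concat [] line
        have hg : (l.map pvFlat ++ [([] : List String)])[l.length]? = some [] := by
          simp
        have hset : ((l.map pvFlat ++ [([] : List String)]).set l.length
              (([] : List String) ++ line.toList.map (fun c => String.ofList [c])))
            = (l ++ [[line]]).map pvFlat := by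
          simp [List.set_append_right, h1]
        simp only [pvStep] at h2 ⊢
        simp [hline, h1] at h2 ⊢
        exact h2
      · have h2 := ih l (t ++ [line])
        have hget : ((l ++ [t]).map pvFlat)[l.length]? = some (pvFlat t) := by
          simp
        have hset : (((l ++ [t]).map pvFlat).set l.length
              (pvFlat t ++ line.toList.map (fun c => String.ofList [c])))
            = (l ++ [t ++ [line]]).map pvFlat := by
          have : ((l ++ [t]).map pvFlat) = l.map pvFlat ++ [pvFlat t] := by simp
          rw [this]
          simp [List.set_append_right, pvFlat_concat]
        simpa [pvStep, hline, ht, hget, hset, pvFlat_concat, List.getLastD_concat,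
          List.dropLast_concat] using h2

theorem pvA_eq_old (file : List String) : parse_answers_file file = pvOld file := by
  unfold parse_answers_file pvOld pvClean
  exact pv_inv file [] []

-- pvStep only touches the last segment (or appends), so a prefix is inert
theorem pv_foldl_prefix (file : List String) :
    ∀ (l s : List (List String)), s ≠ [] →
      file.foldl pvStep (l ++ s) = l ++ file.foldl pvStep s := by
  induction file with
  | nil => intro l s _; rfl
  | cons line file ih =>
    intro l s hs
    simp only [List.foldl_cons]
    by_cases hline : line = ""
    · have : pvStep (l ++ s) line = l ++ (pvStep s line) := by
        simp [pvStep, hline]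
      rw [this, ih l _ (by simp [pvStep, hline])]
    · have hsome : ∃ a, s.getLast? = some a := by
        cases hsl : s.getLast? with
        | none => exact absurd (List.getLast?_eq_none_iff.mp hsl) hs
        | some a => exact ⟨a, rfl⟩
      obtain ⟨a, ha⟩ := hsome
      have : pvStep (l ++ s) line = l ++ (pvStep s line) := by
        simp [pvStep, hline, List.dropLast_append_of_ne_nil hs, ha,
          List.getLast?_append_of_ne_nil l hs]
      rw [this, ih l _ (by simp [pvStep, hline])]

theorem pv_foldl_ne_nil (file : List String) :
    ∀ (s : List (List String)), s ≠ [] → file.foldl pvStep s ≠ [] := by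
  induction file with
  | nil => intro s hs; exact hs
  | cons line file ih =>
    intro s hs
    simp only [List.foldl_cons]
    exact ih _ (by by_cases hline : line = "" <;> simp [pvStep, hline])

-- a run of non-blank lines just extends the single current segment
theorem pv_foldl_noblank (pre : List String) (hpre : "" ∉ pre) :
    ∀ (t : List String), pre.foldl pvStep [t] = [t ++ pre] := by
  induction pre with
  | nil => intro t; simp
  | cons line pre ih =>
    intro t
    have hline : line ≠ "" := fun h => hpre (h ▸ List.mem_cons_self ..)
    have hpre' : "" ∉ pre := fun h => hpre (List.mem_cons_of_mem _ h)
    simp only [List.foldl_cons, pvStep, if_neg hline]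
    simpa using ih hpre' (t ++ [line])

theorem pvOld_eq_alt : ∀ (n : Nat) (file : List String), file.length ≤ n →
    pvOld file = parse_answers_file_alt file := by
  intro n
  induction n with
  | zero =>
    intro file hf
    have : file = [] := List.eq_nil_of_length_eq_zero (Nat.le_zero.mp hf)
    subst this
    simp [pvOld, pvClean, parse_answers_file_alt]
  | succ n ih =>
    intro file hf
    by_cases hfile : file = []
    · subst hfile; simp [pvOld, pvClean, parse_answers_file_alt]
    · rw [parse_answers_file_alt]
      simp only [dif_neg hfile]
      split
      next hidx =>
        have hnot : "" ∉ file := (PySem.List.index?_eq_none_iff ..).mp hidx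
        have := pv_foldl_noblank file hnot []
        simp only [List.nil_append] at this
        have hfl : pvFlat file =
            file.flatMap (fun line => line.toList.map (fun c => String.ofList [c])) :=
          pvFlat_eq_flatMap file
        simp [pvOld, pvClean, this, hfile, hfl]
      next cut hidx =>
        obtain ⟨pre, suf, hsplit, hlen, hnot⟩ := (PySem.List.index?_eq_some_iff ..).mp hidx
        have hcast : ((cut : Int) + 1) = ((cut + 1 : Nat) : Int) := by push_cast; ring
        have hslice1 : PySem.List.slice file none (some (cut : Int)) = pre := by
          rw [PySem.List.slice_to_natCast, hsplit, ← hlen, List.take_left]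
        have hslice2 : PySem.List.slice file (some ((cut : Int) + 1)) none = suf := by
          rw [hcast, PySem.List.slice_from_natCast, hsplit, ← hlen]
          simp
        -- the fold: pre builds [pre], the blank opens [pre, []], suf continues inertly
        have hfold : file.foldl pvStep [[]] = pre :: suf.foldl pvStep [[]] := by
          rw [hsplit]
          have hpre : pre.foldl pvStep [[]] = [pre] := by
            simpa using pv_foldl_noblank pre hnot []
          have h1 : (pre ++ "" :: suf).foldl pvStep [[]]
              = suf.foldl pvStep (pvStep [pre] "") := by
            rw [show pre ++ "" :: suf = (pre ++ [""]) ++ suf by simp,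
              List.foldl_append, List.foldl_append, hpre]
            rfl
          rw [h1]
          have : pvStep [pre] "" = [pre] ++ [[]] := by simp [pvStep]
          rw [this]
          exact pv_foldl_prefix suf [pre] [[]] (by simp)
        have hsufne : suf.foldl pvStep [[]] ≠ [] := pv_foldl_ne_nil suf [[]] (by simp)
        have hlensuf : suf.length ≤ n := by
          have := congrArg List.length hsplit
          simp at this
          omega
        have hih := ih suf hlensuf
        rw [hslice1, hslice2, ← hih]
        unfold pvOld
        rw [hfold, pvClean_cons pre _ hsufne]
        simp [pvFlat_eq_flatMap pre]

-- ===== VERDICT (by name: the statement is the Claim_ definition above) =====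
theorem parse_answers_file_spec : Claim_equal_parse_answers_file := by
  intro the_file _
  unfold Spec_parse_answers_file
  rw [pvA_eq_old, pvOld_eq_alt the_file.length the_file le_rfl]
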